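-- pv_equiv track=rewrite | github.com/aditya-r-m/coding-competitions-archive | codejam/2010/round_1c/making_chess_boards/solution.py | solve
-- ===== SOURCE A (Python) =====
-- from collections import defaultdict
-- from heapq import heappush, heappop
--
-- def solve(grid) -> str:
--     result_map = defaultdict(lambda: 0)
--     m, n = len(grid), len(grid[0])
--     chessboard_max_len = [[1] * n for _ in range(m)]
--     for i in range(-2, -m-1, -1):
--         for j in range(-2, -n-1, -1):
--             if grid[i][j] != grid[i + 1][j] and grid[i][j] != grid[i][j + 1]:
--                 chessboard_max_len[i][j] = min(chessboard_max_len[i + 1][j], chessboard_max_len[i][j + 1])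
--                 if grid[i][j] == grid[i + chessboard_max_len[i][j]][j + chessboard_max_len[i][j]]:
--                     chessboard_max_len[i][j] += 1
--     q = []
--     for i in range(m):
--         for j in range(n):
--             heappush(q, (-chessboard_max_len[i][j], i, j))
--     while q:
--         (l, i, j) = (lambda t: (-t[0], t[1], t[2]))(heappop(q))
--         if l != chessboard_max_len[i][j]: continue
--         result_map[l] += 1
--         for oi in range(max(0, i - l), i + l):
--             for oj in range(max(0, j - l), j + l):
--                 if oi >= i and oj >= j: chessboard_max_len[oi][oj] = 0
--                 elif max(i - oi, j - oj) < chessboard_max_len[oi][oj]: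
--                     chessboard_max_len[oi][oj] = max(i - oi, j - oj)
--                     heappush(q, (-chessboard_max_len[oi][oj], oi, oj))
--     result_lst = list(reversed(sorted(list(result_map.items()))))
--     result_str = f"{len(result_lst)}\n"
--     for (k, v) in result_lst: result_str += f"{k} {v}\n"
--     return result_str
-- ===== SOURCE B (Python) =====
-- def solve(grid) -> str:
--     m, n = len(grid), len(grid[0])
--     chessboard_max_len = [[1] * n for _ in range(m)]
--     for i in range(-2, -m - 1, -1):
--         for j in range(-2, -n - 1, -1):
--             if grid[i][j] != grid[i + 1][j] and grid[i][j] != grid[i][j + 1]: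
--                 chessboard_max_len[i][j] = min(chessboard_max_len[i + 1][j], chessboard_max_len[i][j + 1])
--                 if grid[i][j] == grid[i + chessboard_max_len[i][j]][j + chessboard_max_len[i][j]]:
--                     chessboard_max_len[i][j] += 1
--     result_map = {}
--     L = 0
--     for row in chessboard_max_len:
--         for v in row:
--             L = max(L, v)
--     for l in range(L, 0, -1):
--         for i in range(m):
--             for j in range(n):
--                 if chessboard_max_len[i][j] == l:
--                     result_map[l] = result_map.get(l, 0) + 1
--                     for oi in range(max(0, i - l), i + l):
--                         for oj in range(max(0, j - l), j + l):
--                             if oi >= i and oj >= j: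
--                                 chessboard_max_len[oi][oj] = 0
--                             elif max(i - oi, j - oj) < chessboard_max_len[oi][oj]:
--                                 chessboard_max_len[oi][oj] = max(i - oi, j - oj)
--     result_lst = list(reversed(sorted(result_map.items())))
--     result_str = f"{len(result_lst)}\n"
--     for (k, v) in result_lst:
--         result_str += f"{k} {v}\n"
--     return result_str
-- ===== Notes on version B (the rewrite author's own statement) =====
-- stated objective: alternative
-- what changed: The max-heap greedy (heappush/heappop with stale-entry skipping and re-pushing of decreased cells) is replaced by a level-descending row-major rescan of the DP matrix: for l from the maximum DP value down to 1, process every cell whose current value is exactly l with the same region update; DP phase and output formatting are unchanged.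
import Mathlib
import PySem

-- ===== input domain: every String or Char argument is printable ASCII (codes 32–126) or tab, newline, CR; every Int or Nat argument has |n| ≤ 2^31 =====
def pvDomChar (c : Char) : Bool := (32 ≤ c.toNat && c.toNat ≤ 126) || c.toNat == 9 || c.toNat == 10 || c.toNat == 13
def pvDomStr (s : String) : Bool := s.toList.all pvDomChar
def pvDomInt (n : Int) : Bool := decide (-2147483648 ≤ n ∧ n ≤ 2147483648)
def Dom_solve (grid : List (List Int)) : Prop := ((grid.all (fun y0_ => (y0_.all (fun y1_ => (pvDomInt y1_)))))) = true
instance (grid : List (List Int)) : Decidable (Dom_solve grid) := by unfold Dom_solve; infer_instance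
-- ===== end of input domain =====

-- B replaces A's max-heap greedy (with stale-entry skipping) by a level-descending
-- row-major rescan of the DP matrix; DP phase and output formatting are unchanged.

-- shared transliteration helpers (this code is line-for-line identical in both Pythons)

-- M[i][j] (Python indexing, negative index wraps; default where Python raises — excluded by Pre_)
def pvGetI (M : List (List Int)) (i j : Int) : Int :=
  PySem.List.pyGetD (PySem.List.pyGetD M i []) j 0

-- M[i][j] = v
def pvSetI (M : List (List Int)) (i j : Int) (v : Int) : List (List Int) :=
  PySem.List.pySetD M i (PySem.List.pySetD (PySem.List.pyGetD M i []) j v)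

-- body of the DP double loop (identical in A and B)
def dpStep (grid C : List (List Int)) (i j : Int) : List (List Int) :=
  if pvGetI grid i j ≠ pvGetI grid (i + 1) j ∧ pvGetI grid i j ≠ pvGetI grid i (j + 1) then
    let C1 := pvSetI C i j (min (pvGetI C (i + 1) j) (pvGetI C i (j + 1)))
    let v := pvGetI C1 i j
    if pvGetI grid i j = pvGetI grid (i + v) (j + v) then pvSetI C1 i j (v + 1) else C1
  else C

-- chessboard_max_len after the DP phase (identical in A and B)
def dpPhase (grid : List (List Int)) (m n : Int) : List (List Int) :=
  (PySem.List.pyRange (-2) (-m - 1) (-1)).foldl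
    (fun C i =>
      (PySem.List.pyRange (-2) (-n - 1) (-1)).foldl (fun C j => dpStep grid C i j) C)
    ((PySem.List.pyRange 0 m 1).map (fun _ => PySem.List.pyRepeat [(1 : Int)] n))

-- the output formatting (identical in A and B)
def formatResult (r : PySem.Dict Int Int) : String :=
  let lst := (PySem.List.sorted2 r.items (fun p => p.1) (fun p => p.2) false).reverse
  lst.foldl (fun s kv => s ++ PySem.Int.toStr kv.1 ++ " " ++ PySem.Int.toStr kv.2 ++ "\n")
    (PySem.Int.toStr (PySem.List.len lst) ++ "\n")

-- ===== PORT A =====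
-- lexicographic order on (-l, i, j) triples, as Python compares tuples of ints
def tripLt (a b : Int × Int × Int) : Bool :=
  a.1 < b.1 || (a.1 == b.1 && (a.2.1 < b.2.1 || (a.2.1 == b.2.1 && a.2.2 < b.2.2)))

-- heapq is modelled as a multiset: heappush appends, heappop removes the minimum.
-- Exact here: all simultaneously queued triples are pairwise distinct (a cell is
-- re-pushed only with a strictly smaller value), so the popped minimum is
-- representation-independent.
def heapMin (x : Int × Int × Int) (q : List (Int × Int × Int)) : Int × Int × Int :=
  q.foldl (fun acc y => if tripLt y acc then y else acc) x

-- body of A's region double loop: update the matrix, heappush freshly decreased cells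
def regionStepA (i j : Int) (s : List (List Int) × List (Int × Int × Int)) (oi oj : Int) :
    List (List Int) × List (Int × Int × Int) :=
  if oi ≥ i ∧ oj ≥ j then (pvSetI s.1 oi oj 0, s.2)
  else if max (i - oi) (j - oj) < pvGetI s.1 oi oj then
    (pvSetI s.1 oi oj (max (i - oi) (j - oj)), s.2 ++ [(-(max (i - oi) (j - oj)), oi, oj)])
  else s

def regionA (M : List (List Int)) (q : List (Int × Int × Int)) (i j l : Int) :
    List (List Int) × List (Int × Int × Int) :=
  (PySem.List.pyRange (max 0 (i - l)) (i + l) 1).foldl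
    (fun s oi =>
      (PySem.List.pyRange (max 0 (j - l)) (j + l) 1).foldl
        (fun s oj => regionStepA i j s oi oj) s)
    (M, q)

def sumNat (M : List (List Int)) : Nat := (M.map (fun row => (row.map Int.toNat).sum)).sum

-- A's while-loop over the heap; the fuel argument only makes the recursion structural
-- (it is chosen large enough in solve and, on the runs the claim is about, never runs out)
def loopA : Nat → List (Int × Int × Int) → List (List Int) → PySem.Dict Int Int →
    PySem.Dict Int Int
  | 0, _, _, r => r
  | _ + 1, [], _, r => r
  | f + 1, x :: qs, M, r =>
    let t := heapMin x qs
    let q' := (x :: qs).erase t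
    let l := -t.1
    let i := t.2.1
    let j := t.2.2
    if l ≠ pvGetI M i j then loopA f q' M r
    else
      let s := regionA M q' i j l
      loopA f s.2 s.1 (r.modify l 0 (· + 1))

def solve (grid : List (List Int)) : String :=
  let m : Int := PySem.List.len grid
  let n : Int := PySem.List.len (PySem.List.pyGetD grid 0 [])
  let C := dpPhase grid m n
  let q0 := (PySem.List.pyRange 0 m 1).foldl
    (fun q i =>
      (PySem.List.pyRange 0 n 1).foldl (fun q j => q ++ [(-(pvGetI C i j), i, j)]) q)
    []
  formatResult (loopA (q0.length + sumNat C + 1) q0 C PySem.Dict.empty)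

-- ===== PORT B =====
-- body of B's region double loop (no queue: just the matrix update)
def regionStepB (i j : Int) (M : List (List Int)) (oi oj : Int) : List (List Int) :=
  if oi ≥ i ∧ oj ≥ j then pvSetI M oi oj 0
  else if max (i - oi) (j - oj) < pvGetI M oi oj then
    pvSetI M oi oj (max (i - oi) (j - oj))
  else M

def regionB (M : List (List Int)) (i j l : Int) : List (List Int) :=
  (PySem.List.pyRange (max 0 (i - l)) (i + l) 1).foldl
    (fun M oi =>
      (PySem.List.pyRange (max 0 (j - l)) (j + l) 1).foldl
        (fun M oj => regionStepB i j M oi oj) M)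
    M

-- body of B's scan: process a cell iff its value is exactly the current level l
def scanStep (l : Int) (s : List (List Int) × PySem.Dict Int Int) (i j : Int) :
    List (List Int) × PySem.Dict Int Int :=
  if pvGetI s.1 i j = l then (regionB s.1 i j l, s.2.insert l (s.2.getD l 0 + 1))
  else s

def solve_alt (grid : List (List Int)) : String :=
  let m : Int := PySem.List.len grid
  let n : Int := PySem.List.len (PySem.List.pyGetD grid 0 [])
  let C := dpPhase grid m n
  let L := C.foldl (fun a row => row.foldl (fun a v => max a v) a) 0
  let s := (PySem.List.pyRange L 0 (-1)).foldl
    (fun s l =>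
      (PySem.List.pyRange 0 m 1).foldl
        (fun s i => (PySem.List.pyRange 0 n 1).foldl (fun s j => scanStep l s i j) s) s)
    (C, PySem.Dict.empty)
  formatResult s.2

-- ===== PRECONDITION & SPEC =====
-- Pre_ excludes exactly the inputs on which Python A raises IndexError: the empty grid,
-- and grids with at least 2 rows whose first row has length ≥ 2 in which some row is
-- shorter than the first (the DP loops then index a row at -len(grid[0])).
def Pre_solve (grid : List (List Int)) : Prop :=
  grid ≠ [] ∧ (2 ≤ grid.length → 2 ≤ (grid.headD []).length →
    ∀ row ∈ grid, (grid.headD []).length ≤ row.length)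
instance (grid : List (List Int)) : Decidable (Pre_solve grid) := by
  unfold Pre_solve; infer_instance

def pvWitness_solve : List (List Int) := [[0, 1], [1, 0]]

def Spec_solve (grid : List (List Int)) (out : String) : Prop := out = solve_alt grid
instance (grid : List (List Int)) (out : String) : Decidable (Spec_solve grid out) := by
  unfold Spec_solve; infer_instance

-- ===== CLAIM (what is proved, stated in full; the proofs are below) =====
def Claim_equal_solve : Prop :=
  ∀ (grid : List (List Int)), Dom_solve grid → Pre_solve grid → Spec_solve grid (solve grid)

-- ===== LEMMAS AND PROOFS =====

-- ---- Nat-indexed view of the matrices ----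
def gN (M : List (List Int)) (x y : Nat) : Int := (M.getD x []).getD y 0
def setN (M : List (List Int)) (x y : Nat) (v : Int) : List (List Int) :=
  M.set x ((M.getD x []).set y v)

lemma pyGetD_nonneg {α : Type} (xs : List α) (i : Int) (d : α) (h : 0 ≤ i) :
    PySem.List.pyGetD xs i d = xs.getD i.toNat d := by
  simp only [PySem.List.pyGetD, PySem.List.pyGet?, PySem.List.pyIdx?, if_pos h]
  split_ifs with h2
  · simp [List.getD_eq_getElem?_getD]
  · have : xs.length ≤ i.toNat := by omega
    simp [List.getD_eq_getElem?_getD, List.getElem?_eq_none this]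


lemma pyGetD_negIdx {α : Type} (xs : List α) (i : Int) (d : α)
    (h1 : -(xs.length : Int) ≤ i) (h2 : i < 0) :
    PySem.List.pyGetD xs i d = xs.getD (xs.length - (-i).toNat) d := by
  simp only [PySem.List.pyGetD, PySem.List.pyGet?, PySem.List.pyIdx?]
  rw [if_neg (by omega), if_pos (by omega)]
  have hlt : xs.length - (-i).toNat < xs.length := by omega
  simp [List.getD_eq_getElem?_getD, List.getElem?_eq_getElem hlt]


lemma pySetD_negIdx {α : Type} (xs : List α) (i : Int) (v : α)
    (h1 : -(xs.length : Int) ≤ i) (h2 : i < 0) :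
    PySem.List.pySetD xs i v = xs.set (xs.length - (-i).toNat) v := by
  simp only [PySem.List.pySetD, PySem.List.pySet?, PySem.List.pyIdx?]
  rw [if_neg (by omega), if_pos (by omega)]
  rfl


lemma pvGetI_eq_gN (M : List (List Int)) (i j : Int) (hi : 0 ≤ i) (hj : 0 ≤ j) :
    pvGetI M i j = gN M i.toNat j.toNat := by
  simp [pvGetI, gN, pyGetD_nonneg _ _ _ hi, pyGetD_nonneg _ _ _ hj]


lemma pvSetI_eq_setN (M : List (List Int)) (i j : Int) (v : Int) (hi : 0 ≤ i) (hj : 0 ≤ j) :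
    pvSetI M i j v = setN M i.toNat j.toNat v := by
  simp [pvSetI, setN, PySem.List.pySetD_of_nonneg _ _ hi, PySem.List.pySetD_of_nonneg _ _ hj,
    pyGetD_nonneg _ _ _ hi, List.getD_eq_getElem?_getD]


lemma gN_oob (M : List (List Int)) (x y : Nat)
    (h : M.length ≤ x ∨ (M.getD x []).length ≤ y) : gN M x y = 0 := by
  rcases h with h | h
  · simp [gN, List.getD_eq_getElem?_getD, List.getElem?_eq_none h]
  · have : (M[x]?.getD []).length ≤ y := by simpa [List.getD_eq_getElem?_getD] using h
    simp [gN, List.getD_eq_getElem?_getD, List.getElem?_eq_none this]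


lemma length_setN (M : List (List Int)) (x y : Nat) (v : Int) :
    (setN M x y v).length = M.length := by simp [setN]


lemma row_setN (M : List (List Int)) (x y : Nat) (v : Int) (x' : Nat) :
    (setN M x y v).getD x' [] =
      if x' = x ∧ x < M.length then (M.getD x []).set y v else M.getD x' [] := by
  simp only [setN, List.getD_eq_getElem?_getD, List.getElem?_set]
  split_ifs <;> simp_all


lemma rowlen_setN (M : List (List Int)) (x y : Nat) (v : Int) (x' : Nat) :
    ((setN M x y v).getD x' []).length = (M.getD x' []).length := by
  rw [row_setN]
  split_ifs with h
  · rw [h.1]; simp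
  · rfl


lemma gN_setN (M : List (List Int)) (x y : Nat) (v : Int) (x' y' : Nat) :
    gN (setN M x y v) x' y' =
      if x' = x ∧ y' = y ∧ x < M.length ∧ y < (M.getD x []).length then v
      else gN M x' y' := by
  simp only [gN, row_setN]
  by_cases hx : x' = x ∧ x < M.length
  · obtain ⟨hx1, hx2⟩ := hx
    subst hx1
    rw [if_pos ⟨rfl, hx2⟩]
    by_cases hy : y' = y
    · subst hy
      by_cases hyr : y' < (M.getD x' []).length
      · rw [if_pos ⟨rfl, rfl, hx2, hyr⟩]
        have hyr' : y' < (M[x']?.getD []).length := by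
          simpa [List.getD_eq_getElem?_getD] using hyr
        simp [List.getD_eq_getElem?_getD, List.getElem?_set_self hyr']
      · rw [if_neg (fun hc => hyr hc.2.2.2)]
        have : (M.getD x' []).set y' v = M.getD x' [] := by
          apply List.set_eq_of_length_le; omega
        rw [this]
    · rw [if_neg (fun hc => hy hc.2.1)]
      simp [List.getD_eq_getElem?_getD, List.getElem?_set_ne (fun hc => hy hc.symm)]
  · rw [if_neg hx, if_neg (fun hc => hx ⟨hc.1, hc.2.2.1⟩)]


-- same lengths of everything
def SameShape (M' M : List (List Int)) : Prop :=
  M'.length = M.length ∧ ∀ x : Nat, ((M'.getD x []).length = (M.getD x []).length)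

lemma SameShape.refl (M : List (List Int)) : SameShape M M := ⟨rfl, fun _ => rfl⟩

lemma SameShape.trans {M1 M2 M3 : List (List Int)} :
    SameShape M1 M2 → SameShape M2 M3 → SameShape M1 M3 :=
  fun h1 h2 => ⟨h1.1.trans h2.1, fun x => (h1.2 x).trans (h2.2 x)⟩

lemma sameShape_setN (M : List (List Int)) (x y : Nat) (v : Int) :
    SameShape (setN M x y v) M := ⟨length_setN M x y v, rowlen_setN M x y v⟩


def NN (M : List (List Int)) : Prop := ∀ x y : Nat, 0 ≤ gN M x y

-- ---- sums ----
lemma rowSum_set (r : List Int) (b : Nat) (v : Int) (hb : b < r.length) :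
    ((r.set b v).map Int.toNat).sum + (r.getD b 0).toNat
      = (r.map Int.toNat).sum + v.toNat := by
  induction r generalizing b with
  | nil => simp at hb
  | cons a t ih =>
    cases b with
    | zero => simp [List.set]; omega
    | succ b' =>
      simp only [List.set, List.map, List.sum_cons, List.getD_cons_succ]
      have := ih b' (by simpa using hb)
      omega


lemma sumNat_setN (M : List (List Int)) (x y : Nat) (v : Int)
    (hx : x < M.length) (hy : y < (M.getD x []).length) :
    sumNat (setN M x y v) + (gN M x y).toNat = sumNat M + v.toNat := by
  induction M generalizing x with
  | nil => simp at hx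
  | cons R t ih =>
    cases x with
    | zero =>
      simp only [setN, List.set, List.getD_cons_zero, gN, sumNat, List.map, List.sum_cons]
      have := rowSum_set R y v (by simpa using hy)
      omega
    | succ x' =>
      have hx' : x' < t.length := by simpa using hx
      have hy' : y < (t.getD x' []).length := by simpa using hy
      have := ih x' hx' hy'
      simp only [setN, List.set, List.getD_cons_succ, gN, sumNat, List.map,
        List.sum_cons] at *
      omega


lemma rowSum_le (r' r : List Int)
    (hp : ∀ y : Nat, (r'.getD y 0).toNat ≤ (r.getD y 0).toNat) :
    ((r'.map Int.toNat).sum ≤ (r.map Int.toNat).sum) := by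
  induction r' generalizing r with
  | nil => simp
  | cons a t' ih =>
    cases r with
    | nil =>
      have h0 := hp 0
      have ht : ∀ y : Nat, (t'.getD y 0).toNat ≤ (([] : List Int).getD y 0).toNat :=
        fun y => by simpa using hp (y + 1)
      have := ih [] ht
      simp_all
    | cons b t =>
      have h0 := hp 0
      have := ih t (fun y => by simpa using hp (y + 1))
      simp only [List.map, List.sum_cons, List.getD_cons_zero] at *
      · have hb : a.toNat ≤ b.toNat := by simpa using h0
        omega

lemma sumNat_le_of_pointwise (M' M : List (List Int))
    (hp : ∀ x y : Nat, (gN M' x y).toNat ≤ (gN M x y).toNat) :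
    sumNat M' ≤ sumNat M := by
  induction M' generalizing M with
  | nil => simp [sumNat]
  | cons R' t' ih =>
    cases M with
    | nil =>
      have h0 := rowSum_le R' [] (fun y => by simpa using hp 0 y)
      have := ih [] (fun x y => by simpa using hp (x + 1) y)
      simp only [sumNat, List.map, List.sum_cons] at *
      simp_all
    | cons R t =>
      have h0 := rowSum_le R' R (fun y => by simpa using hp 0 y)
      have := ih t (fun x y => by simpa using hp (x + 1) y)
      simp only [sumNat, List.map, List.sum_cons] at *
      omega


lemma rowSum_lt (r' r : List Int)
    (hp : ∀ y : Nat, (r'.getD y 0).toNat ≤ (r.getD y 0).toNat)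
    (b : Nat) (hb : b < r.length)
    (hstrict : (r'.getD b 0).toNat < (r.getD b 0).toNat) :
    ((r'.map Int.toNat).sum < (r.map Int.toNat).sum) := by
  induction r generalizing r' b with
  | nil => simp at hb
  | cons a t ih =>
    cases b with
    | zero =>
      cases r' with
      | nil =>
        simp only [List.getD_cons_zero, List.getD_nil] at hstrict
        have := rowSum_le [] t (fun y => by simp)
        simp only [List.map, List.sum_cons] at *
        simp only [List.map_nil, List.sum_nil]
        omega
      | cons a' t'' =>
        have ht := rowSum_le t'' t (fun y => by simpa using hp (y + 1))
        simp only [List.map, List.sum_cons, List.getD_cons_zero] at *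
        omega
    | succ b' =>
      cases r' with
      | nil =>
        have := ih [] (fun y => by simp) b' (by simpa using hb)
          (by simpa using hstrict)
        simp only [List.map, List.sum_cons] at *
        simp only [List.map_nil, List.sum_nil] at *
        omega
      | cons a' t'' =>
        have h0 := hp 0
        have := ih t'' (fun y => by simpa using hp (y + 1)) b' (by simpa using hb)
          (by simpa using hstrict)
        simp only [List.map, List.sum_cons, List.getD_cons_zero] at *
        omega

lemma sumNat_lt_of_pointwise (M' M : List (List Int))
    (hp : ∀ x y : Nat, (gN M' x y).toNat ≤ (gN M x y).toNat)
    (a b : Nat) (ha : a < M.length) (hb : b < (M.getD a []).length)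
    (hstrict : (gN M' a b).toNat < (gN M a b).toNat) :
    sumNat M' < sumNat M := by
  induction M generalizing M' a with
  | nil => simp at ha
  | cons R t ih =>
    cases a with
    | zero =>
      have h0 := rowSum_lt (M'.getD 0 []) R (fun y => by simpa [gN] using hp 0 y) b
        (by simpa using hb) (by simpa [gN] using hstrict)
      have ht := sumNat_le_of_pointwise (M'.drop 1) t
        (fun x y => by
          cases M' with
          | nil => simpa [gN] using hp (x + 1) y
          | cons R' t' => simpa [gN] using hp (x + 1) y)
      cases M' with
      | nil =>
        simp only [sumNat, List.map, List.sum_cons] at *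
        simp only [List.map_nil, List.sum_nil] at *
        omega
      | cons R' t' =>
        simp only [sumNat, List.map, List.sum_cons, List.drop] at *
        simp only [List.getD_cons_zero] at h0
        omega
    | succ a' =>
      have ha' : a' < t.length := by simpa using ha
      have hb' : b < (t.getD a' []).length := by simpa using hb
      have hrec := ih (M'.drop 1)
        (fun x y => by
          cases M' with
          | nil => simpa [gN] using hp (x + 1) y
          | cons R' t' => simpa [gN] using hp (x + 1) y)
        a' ha' hb'
        (by
          cases M' with
          | nil => simpa [gN] using hstrict
          | cons R' t' => simpa [gN] using hstrict)
      have h0 := rowSum_le (M'.getD 0 []) R (fun y => by simpa [gN] using hp 0 y)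
      cases M' with
      | nil =>
        simp only [sumNat, List.map, List.sum_cons, List.drop] at *
        simp only [List.map_nil, List.sum_nil] at *
        omega
      | cons R' t' =>
        simp only [sumNat, List.map, List.sum_cons, List.drop] at *
        simp only [List.getD_cons_zero] at h0
        omega


-- ---- single region step (B form; A's matrix component coincides) ----
lemma stB_char (M : List (List Int)) (i j oi oj : Int)
    (hoi : 0 ≤ oi) (hoj : 0 ≤ oj) :
    regionStepB i j M oi oj =
      if oi ≥ i ∧ oj ≥ j then setN M oi.toNat oj.toNat 0
      else if max (i - oi) (j - oj) < gN M oi.toNat oj.toNat then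
        setN M oi.toNat oj.toNat (max (i - oi) (j - oj))
      else M := by
  unfold regionStepB
  rw [pvGetI_eq_gN M oi oj hoi hoj, pvSetI_eq_setN M oi oj 0 hoi hoj,
    pvSetI_eq_setN M oi oj _ hoi hoj]


lemma stB_shape (M : List (List Int)) (i j oi oj : Int) (hoi : 0 ≤ oi) (hoj : 0 ≤ oj) :
    SameShape (regionStepB i j M oi oj) M := by
  rw [stB_char M i j oi oj hoi hoj]
  split_ifs <;> first | exact sameShape_setN _ _ _ _ | exact SameShape.refl M


lemma stB_NN (M : List (List Int)) (i j oi oj : Int) (hoi : 0 ≤ oi) (hoj : 0 ≤ oj)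
    (hNN : NN M) : NN (regionStepB i j M oi oj) := by
  rw [stB_char M i j oi oj hoi hoj]
  split_ifs with h1 h2 <;> intro x y
  · rw [gN_setN]
    split_ifs with h
    · omega
    · exact hNN x y
  · rw [gN_setN]; split_ifs with h
    · omega
    · exact hNN x y
  · exact hNN x y


lemma stB_mono (M : List (List Int)) (i j oi oj : Int) (hoi : 0 ≤ oi) (hoj : 0 ≤ oj)
    (hNN : NN M) (x y : Nat) : gN (regionStepB i j M oi oj) x y ≤ gN M x y := by
  rw [stB_char M i j oi oj hoi hoj]
  split_ifs with h1 h2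
  · rw [gN_setN]; split_ifs with h
    · obtain ⟨hx, hy, _⟩ := h; subst hx; subst hy; exact hNN oi.toNat oj.toNat
    · exact le_refl _
  · rw [gN_setN]; split_ifs with h
    · obtain ⟨hx, hy, _⟩ := h; subst hx; subst hy; omega
    · exact le_refl _
  · exact le_refl _


lemma stB_zero_keep (M : List (List Int)) (i j oi oj : Int)
    (hi : 0 ≤ i) (hj : 0 ≤ j) (hoi : 0 ≤ oi) (hoj : 0 ≤ oj)
    (h : gN M i.toNat j.toNat = 0) :
    gN (regionStepB i j M oi oj) i.toNat j.toNat = 0 := by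
  rw [stB_char M i j oi oj hoi hoj]
  split_ifs with h1 h2
  · rw [gN_setN]
    split_ifs with hc
    · rfl
    · exact h
  · rw [gN_setN]; split_ifs with hc
    · exfalso
      obtain ⟨hx, hy, _, _⟩ := hc
      have hoi' : oi = i := by omega
      have hoj' : oj = j := by omega
      subst hoi'; subst hoj'
      omega
    · exact h
  · exact h


lemma stB_self_zero (M : List (List Int)) (i j : Int) (hi : 0 ≤ i) (hj : 0 ≤ j) :
    gN (regionStepB i j M i j) i.toNat j.toNat = 0 := by
  rw [stB_char M i j i j hi hj]
  rw [if_pos ⟨le_refl i, le_refl j⟩, gN_setN]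
  split_ifs with hc
  · rfl
  · apply gN_oob
    by_cases hx : i.toNat < M.length
    · right
      by_cases hy : j.toNat < (M.getD i.toNat []).length
      · exact absurd ⟨rfl, rfl, hx, hy⟩ hc
      · omega
    · left; omega


-- ---- region folds (B) ----
lemma rowB_bundle (i j : Int) (oi : Int) (hoi : 0 ≤ oi) :
    ∀ (ojs : List Int) (M : List (List Int)), (∀ oj ∈ ojs, 0 ≤ oj) → NN M →
      NN (ojs.foldl (fun M oj => regionStepB i j M oi oj) M) ∧
        SameShape (ojs.foldl (fun M oj => regionStepB i j M oi oj) M) M ∧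
        (∀ x y : Nat, gN (ojs.foldl (fun M oj => regionStepB i j M oi oj) M) x y ≤ gN M x y) := by
  intro ojs
  induction ojs with
  | nil => exact fun M _ hNN => ⟨hNN, SameShape.refl M, fun _ _ => le_refl _⟩
  | cons oj t ih =>
    intro M hnn hNN
    have hoj : 0 ≤ oj := hnn oj (by simp)
    have h1 := stB_NN M i j oi oj hoi hoj hNN
    have h2 := stB_shape M i j oi oj hoi hoj
    have h3 := fun x y => stB_mono M i j oi oj hoi hoj hNN x y
    have := ih (regionStepB i j M oi oj) (fun z hz => hnn z (by simp [hz])) h1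
    exact ⟨this.1, this.2.1.trans h2,
      fun x y => le_trans (this.2.2 x y) (h3 x y)⟩

lemma regionB_bundle (M : List (List Int)) (i j l : Int) (hi : 0 ≤ i) (hj : 0 ≤ j)
    (hNN : NN M) :
    NN (regionB M i j l) ∧ SameShape (regionB M i j l) M ∧
      (∀ x y : Nat, gN (regionB M i j l) x y ≤ gN M x y) := by
  unfold regionB
  have hgen : ∀ (ois : List Int) (M : List (List Int)), (∀ oi ∈ ois, 0 ≤ oi) → NN M →
      NN (ois.foldl (fun M oi => (PySem.List.pyRange (max 0 (j - l)) (j + l) 1).foldl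
          (fun M oj => regionStepB i j M oi oj) M) M) ∧
        SameShape (ois.foldl (fun M oi => (PySem.List.pyRange (max 0 (j - l)) (j + l) 1).foldl
          (fun M oj => regionStepB i j M oi oj) M) M) M ∧
        (∀ x y : Nat, gN (ois.foldl (fun M oi => (PySem.List.pyRange (max 0 (j - l)) (j + l) 1).foldl
          (fun M oj => regionStepB i j M oi oj) M) M) x y ≤ gN M x y) := by
    intro ois
    induction ois with
    | nil => exact fun M _ hNN => ⟨hNN, SameShape.refl M, fun _ _ => le_refl _⟩
    | cons oi t ih =>
      intro M hnn hNN
      have hoi : 0 ≤ oi := hnn oi (by simp)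
      have hojs : ∀ oj ∈ PySem.List.pyRange (max 0 (j - l)) (j + l) 1, 0 ≤ oj := by
        intro oj hm
        have := (PySem.List.mem_pyRange_one).mp hm
        omega
      have hrow := rowB_bundle i j oi hoi (PySem.List.pyRange (max 0 (j - l)) (j + l) 1)
        M hojs hNN
      have := ih _ (fun z hz => hnn z (by simp [hz])) hrow.1
      exact ⟨this.1, this.2.1.trans hrow.2.1,
        fun x y => le_trans (this.2.2 x y) (hrow.2.2 x y)⟩
  have hois : ∀ oi ∈ PySem.List.pyRange (max 0 (i - l)) (i + l) 1, 0 ≤ oi := by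
    intro oi hm
    have := (PySem.List.mem_pyRange_one).mp hm
    omega
  exact hgen _ M hois hNN

lemma rowB_zero_keep (i j oi : Int) (hi : 0 ≤ i) (hj : 0 ≤ j) (hoi : 0 ≤ oi) :
    ∀ (ojs : List Int) (M : List (List Int)), (∀ oj ∈ ojs, 0 ≤ oj) →
      gN M i.toNat j.toNat = 0 →
      gN (ojs.foldl (fun M oj => regionStepB i j M oi oj) M) i.toNat j.toNat = 0 := by
  intro ojs
  induction ojs with
  | nil => exact fun M _ h => h
  | cons oj t ih =>
    intro M hnn h
    exact ih _ (fun z hz => hnn z (by simp [hz]))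
      (stB_zero_keep M i j oi oj hi hj hoi (hnn oj (by simp)) h)

lemma rowB_zero (i j : Int) (hi : 0 ≤ i) (hj : 0 ≤ j) :
    ∀ (ojs : List Int) (M : List (List Int)), (∀ oj ∈ ojs, 0 ≤ oj) → j ∈ ojs →
      gN (ojs.foldl (fun M oj => regionStepB i j M i oj) M) i.toNat j.toNat = 0 := by
  intro ojs M hnn hmem
  obtain ⟨p, sfx, rfl⟩ := List.append_of_mem hmem
  rw [List.foldl_append, List.foldl_cons]
  exact rowB_zero_keep i j i hi hj hi sfx _
    (fun z hz => hnn z (by simp [hz]))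
    (stB_self_zero _ i j hi hj)

lemma regionB_zero (M : List (List Int)) (i j l : Int) (hi : 0 ≤ i) (hj : 0 ≤ j)
    (hl : 1 ≤ l) : gN (regionB M i j l) i.toNat j.toNat = 0 := by
  unfold regionB
  have hmem : i ∈ PySem.List.pyRange (max 0 (i - l)) (i + l) 1 := by
    rw [PySem.List.mem_pyRange_one]; omega
  have hjmem : j ∈ PySem.List.pyRange (max 0 (j - l)) (j + l) 1 := by
    rw [PySem.List.mem_pyRange_one]; omega
  have hojs : ∀ oj ∈ PySem.List.pyRange (max 0 (j - l)) (j + l) 1, 0 ≤ oj := by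
    intro oj hm; have := (PySem.List.mem_pyRange_one).mp hm; omega
  obtain ⟨p, sfx, heq⟩ := List.append_of_mem hmem
  have hnnp : ∀ oi ∈ p, 0 ≤ oi := by
    intro oi hm
    have : oi ∈ PySem.List.pyRange (max 0 (i - l)) (i + l) 1 := by
      rw [heq]; simp [hm]
    have := (PySem.List.mem_pyRange_one).mp this
    omega
  have hnns : ∀ oi ∈ sfx, 0 ≤ oi := by
    intro oi hm
    have : oi ∈ PySem.List.pyRange (max 0 (i - l)) (i + l) 1 := by
      rw [heq]; simp [hm]
    have := (PySem.List.mem_pyRange_one).mp this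
    omega
  rw [heq, List.foldl_append, List.foldl_cons]
  -- after the row at oi = i the cell is zero; the remaining rows keep it zero
  have hzero := rowB_zero i j hi hj (PySem.List.pyRange (max 0 (j - l)) (j + l) 1)
    (p.foldl (fun M oi => (PySem.List.pyRange (max 0 (j - l)) (j + l) 1).foldl
      (fun M oj => regionStepB i j M oi oj) M) M) hojs hjmem
  -- remaining rows: each full row keeps the zero
  have : ∀ (ois : List Int) (M : List (List Int)), (∀ oi ∈ ois, 0 ≤ oi) →
      gN M i.toNat j.toNat = 0 →
      gN (ois.foldl (fun M oi => (PySem.List.pyRange (max 0 (j - l)) (j + l) 1).foldl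
        (fun M oj => regionStepB i j M oi oj) M) M) i.toNat j.toNat = 0 := by
    intro ois
    induction ois with
    | nil => exact fun M _ h => h
    | cons oi t ih =>
      intro M hnn h
      exact ih _ (fun z hz => hnn z (by simp [hz]))
        (rowB_zero_keep i j oi hi hj (hnn oi (by simp)) _ M hojs h)
  exact this sfx _ hnns hzero

lemma sumNat_regionB_lt (M : List (List Int)) (i j l : Int) (hi : 0 ≤ i) (hj : 0 ≤ j)
    (hl : 1 ≤ l) (hNN : NN M) (hg : gN M i.toNat j.toNat = l)
    (hx : i.toNat < M.length) (hy : j.toNat < (M.getD i.toNat []).length) :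
    sumNat (regionB M i j l) < sumNat M := by
  obtain ⟨hNN', hsh, hmono⟩ := regionB_bundle M i j l hi hj hNN
  have hp : ∀ x y : Nat, (gN (regionB M i j l) x y).toNat ≤ (gN M x y).toNat := by
    intro x y
    have h1 := hmono x y
    have h2 := hNN' x y
    omega
  have hstrict : (gN (regionB M i j l) i.toNat j.toNat).toNat
      < (gN M i.toNat j.toNat).toNat := by
    have h0 := regionB_zero M i j l hi hj hl
    omega
  exact sumNat_lt_of_pointwise _ _ hp i.toNat j.toNat hx hy hstrict

-- ---- tripLt order facts ----
lemma tripLt_irrefl (a : Int × Int × Int) : tripLt a a = false := by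
  simp [tripLt]

lemma tripLt_trans (a b c : Int × Int × Int) :
    tripLt a b = true → tripLt b c = true → tripLt a c = true := by
  simp only [tripLt, Bool.or_eq_true, Bool.and_eq_true, decide_eq_true_eq, beq_iff_eq]
  omega

lemma tripLt_antisymm (a b : Int × Int × Int) :
    tripLt a b = false → tripLt b a = false → a = b := by
  simp only [tripLt, Bool.or_eq_false_iff, Bool.and_eq_false_iff,
    decide_eq_false_iff_not, beq_eq_false_iff_ne, ne_eq]
  intro h1 h2
  have : a.1 = b.1 ∧ a.2.1 = b.2.1 ∧ a.2.2 = b.2.2 := by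
    rcases a with ⟨a1, a2, a3⟩
    rcases b with ⟨b1, b2, b3⟩
    simp only at *
    omega
  calc a = (a.1, a.2.1, a.2.2) := rfl
    _ = (b.1, b.2.1, b.2.2) := by rw [this.1, this.2.1, this.2.2]
    _ = b := rfl


lemma heapMin_mem (x : Int × Int × Int) (q : List (Int × Int × Int)) :
    heapMin x q ∈ x :: q := by
  unfold heapMin
  induction q generalizing x with
  | nil => simp
  | cons y t ih =>
    rw [List.foldl_cons]
    by_cases h : tripLt y x = true
    · rw [if_pos h]
      rcases List.mem_cons.mp (ih y) with h' | h' <;> simp [h']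
    · rw [if_neg h]
      rcases List.mem_cons.mp (ih x) with h' | h' <;> simp [h']

lemma tripLt_total (a b : Int × Int × Int) (h : tripLt a b = false) :
    tripLt b a = true ∨ a = b :=
  by_contra fun hc => by
    rw [not_or] at hc
    exact hc.2 (tripLt_antisymm a b h (by simpa using hc.1))

lemma heapMin_min (x : Int × Int × Int) (q : List (Int × Int × Int)) :
    ∀ u ∈ x :: q, tripLt u (heapMin x q) = false := by
  unfold heapMin
  induction q generalizing x with
  | nil =>
    intro u hu
    simp only [List.mem_singleton] at hu
    subst hu
    simp [tripLt_irrefl]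
  | cons y t ih =>
    intro u hu
    rw [List.foldl_cons]
    by_cases h : tripLt y x = true
    · rw [if_pos h]
      rcases List.mem_cons.mp hu with h' | h'
      · subst h'
        have hres := ih y y (by simp)
        by_contra hc
        have hxy : tripLt u (t.foldl (fun acc z => if tripLt z acc then z else acc) y) = true := by
          simpa using hc
        exact absurd (tripLt_trans y u _ h hxy) (by simp [hres])
      · exact ih y u h'
    · rw [if_neg h]
      rcases List.mem_cons.mp hu with h' | h'
      · subst h'
        exact ih u u (by simp)
      · rcases List.mem_cons.mp h' with h'' | h''
        · subst h''
          have hresx := ih x x (by simp)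
          by_contra hc
          have hyres : tripLt u (t.foldl (fun acc z => if tripLt z acc then z else acc) x) = true := by
            simpa using hc
          rcases tripLt_total u x (by simpa using h) with hxy | hxy
          · exact absurd (tripLt_trans x u _ hxy hyres) (by simp [hresx])
          · subst hxy
            exact hc hresx
        · exact ih x u (by simp [h''])

-- ---- live cells, pick, abstract greedy ----
def cellTrip (M : List (List Int)) (x y : Nat) : Int × Int × Int :=
  (-(gN M x y), (x : Int), (y : Int))

def liveList (M : List (List Int)) : List (Int × Int × Int) :=
  (List.range M.length).flatMap (fun x =>
    (List.range (M.getD x []).length).flatMap (fun y =>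
      if 1 ≤ gN M x y then [cellTrip M x y] else []))

def pick (M : List (List Int)) : Option (Int × Int × Int) :=
  match liveList M with
  | [] => none
  | x :: t => some (heapMin x t)

lemma mem_liveList (M : List (List Int)) (t : Int × Int × Int) :
    t ∈ liveList M ↔ ∃ x y : Nat, x < M.length ∧ y < (M.getD x []).length ∧
      1 ≤ gN M x y ∧ t = cellTrip M x y := by
  simp only [liveList, List.mem_flatMap, List.mem_range]
  constructor
  · rintro ⟨x, hx, y, hy, hmem⟩
    by_cases h : 1 ≤ gN M x y
    · rw [if_pos h] at hmem
      simp only [List.mem_singleton] at hmem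
      exact ⟨x, y, hx, hy, h, hmem⟩
    · rw [if_neg h] at hmem
      simp at hmem
  · rintro ⟨x, y, hx, hy, h, rfl⟩
    exact ⟨x, hx, y, hy, by rw [if_pos h]; simp⟩


lemma live_mem (M : List (List Int)) (x y : Nat) (h1 : 1 ≤ gN M x y) :
    cellTrip M x y ∈ liveList M := by
  rw [mem_liveList]
  refine ⟨x, y, ?_, ?_, h1, rfl⟩
  · by_contra hc
    rw [gN_oob M x y (Or.inl (by omega))] at h1
    omega
  · by_contra hc
    rw [gN_oob M x y (Or.inr (by omega))] at h1
    omega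


lemma pick_none_iff (M : List (List Int)) :
    pick M = none ↔ ∀ x y : Nat, gN M x y ≤ 0 := by
  unfold pick
  constructor
  · intro h x y
    by_contra hc
    have h1 : 1 ≤ gN M x y := by omega
    have := live_mem M x y h1
    cases heq : liveList M with
    | nil => rw [heq] at this; simp at this
    | cons a t => rw [heq] at h; simp at h
  · intro h
    cases heq : liveList M with
    | nil => simp
    | cons a t =>
      exfalso
      have : a ∈ liveList M := by rw [heq]; simp
      obtain ⟨x, y, _, _, h1, _⟩ := (mem_liveList M a).mp this
      have := h x y
      omega


lemma pick_some (M : List (List Int)) (t : Int × Int × Int) (h : pick M = some t) :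
    t ∈ liveList M ∧ ∀ u ∈ liveList M, tripLt u t = false := by
  unfold pick at h
  cases heq : liveList M with
  | nil => rw [heq] at h; simp at h
  | cons a tail =>
    rw [heq] at h
    simp only [Option.some_inj] at h
    subst h
    exact ⟨heq ▸ heapMin_mem a tail, heq ▸ heapMin_min a tail⟩


lemma pick_eq (M : List (List Int)) (t : Int × Int × Int) (ht : t ∈ liveList M)
    (hmin : ∀ u ∈ liveList M, tripLt u t = false) : pick M = some t := by
  cases heq : pick M with
  | none =>
    obtain ⟨x, y, _, _, h1, rfl⟩ := (mem_liveList M t).mp ht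
    have := (pick_none_iff M).mp heq x y
    omega
  | some u =>
    obtain ⟨hu, humin⟩ := pick_some M u heq
    rw [tripLt_antisymm u t (hmin u hu) (humin t ht)]


def absL : Nat → List (List Int) → PySem.Dict Int Int → PySem.Dict Int Int
  | 0, _, r => r
  | f + 1, M, r =>
    match pick M with
    | none => r
    | some t =>
      absL f (regionB M t.2.1 t.2.2 (-t.1)) (r.insert (-t.1) (r.getD (-t.1) 0 + 1))

lemma pick_char (M : List (List Int)) (t : Int × Int × Int) (h : pick M = some t) :
    0 ≤ t.2.1 ∧ 0 ≤ t.2.2 ∧ 1 ≤ -t.1 ∧ gN M t.2.1.toNat t.2.2.toNat = -t.1 ∧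
      t.2.1.toNat < M.length ∧ t.2.2.toNat < (M.getD t.2.1.toNat []).length := by
  obtain ⟨ht, _⟩ := pick_some M t h
  obtain ⟨x, y, hx, hy, h1, rfl⟩ := (mem_liveList M t).mp ht
  refine ⟨by simp [cellTrip], by simp [cellTrip], by simp [cellTrip, h1],
    by simp [cellTrip], by simp [cellTrip, hx], ?_⟩
  simpa [cellTrip, List.getD_eq_getElem?_getD, List.getElem?_eq_getElem hx] using hy


lemma absL_congr (f f' : Nat) (M : List (List Int)) (r : PySem.Dict Int Int)
    (hNN : NN M) (h1 : sumNat M < f) (h2 : sumNat M < f') :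
    absL f M r = absL f' M r := by
  induction f generalizing f' M r with
  | zero => omega
  | succ f ih =>
    cases f' with
    | zero => omega
    | succ f' =>
      simp only [absL]
      cases hp : pick M with
      | none => rfl
      | some t =>
        obtain ⟨ht1, ht2, ht3, ht4, ht5, ht6⟩ := pick_char M t hp
        have hNN' := (regionB_bundle M t.2.1 t.2.2 (-t.1) ht1 ht2 hNN).1
        have hlt := sumNat_regionB_lt M t.2.1 t.2.2 (-t.1) ht1 ht2 ht3 hNN ht4 ht5 ht6
        exact ih _ _ _ hNN' (by omega) (by omega)


-- ---- A-side invariants and simulation ----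
def InvH (i j : Int) (s : List (List Int) × List (Int × Int × Int)) : Prop :=
  NN s.1 ∧
  (∀ t ∈ s.2, 0 ≤ t.2.1 ∧ 0 ≤ t.2.2 ∧ 1 ≤ -t.1 ∧ pvGetI s.1 t.2.1 t.2.2 ≤ -t.1) ∧
  (∀ x y : Int, 0 ≤ x → 0 ≤ y → ¬(x = i ∧ y = j) → 1 ≤ pvGetI s.1 x y →
    (-(pvGetI s.1 x y), x, y) ∈ s.2)

lemma foldl_inv {α σ : Type} (F : σ → α → σ) (P : σ → Prop) :
    ∀ (l : List α) (s : σ), (∀ s x, x ∈ l → P s → P (F s x)) → P s → P (l.foldl F s) := by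
  intro l
  induction l with
  | nil => exact fun s _ h => h
  | cons a t ih =>
    intro s hstep h
    exact ih (F s a) (fun s' x hx => hstep s' x (by simp [hx])) (hstep s a (by simp) h)


lemma stB_get_ne (M : List (List Int)) (i j oi oj : Int)
    (hoi : 0 ≤ oi) (hoj : 0 ≤ oj) (x y : Nat)
    (hne : ¬(x = oi.toNat ∧ y = oj.toNat)) :
    gN (regionStepB i j M oi oj) x y = gN M x y := by
  rw [stB_char M i j oi oj hoi hoj]
  split_ifs with h1 h2 <;> try rfl
  all_goals rw [gN_setN]; rw [if_neg (fun hc => hne ⟨hc.1, hc.2.1⟩)]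

lemma stA_fst (i j oi oj : Int) (s : List (List Int) × List (Int × Int × Int)) :
    (regionStepA i j s oi oj).1 = regionStepB i j s.1 oi oj := by
  unfold regionStepA regionStepB
  split_ifs <;> rfl

lemma stA_snd (i j oi oj : Int) (s : List (List Int) × List (Int × Int × Int)) :
    (regionStepA i j s oi oj).2 =
      if oi ≥ i ∧ oj ≥ j then s.2
      else if max (i - oi) (j - oj) < pvGetI s.1 oi oj then
        s.2 ++ [(-(max (i - oi) (j - oj)), oi, oj)]
      else s.2 := by
  unfold regionStepA
  split_ifs <;> rfl


lemma foldl_fst_eq {σ τ α : Type} (F : σ × τ → α → σ × τ) (f : σ → α → σ)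
    (h : ∀ s x, (F s x).1 = f s.1 x) :
    ∀ (l : List α) (s : σ × τ), (l.foldl F s).1 = l.foldl f s.1 := by
  intro l
  induction l with
  | nil => exact fun s => rfl
  | cons a t ih =>
    intro s
    rw [List.foldl_cons, List.foldl_cons, ih, h]

lemma regionA_fst (M : List (List Int)) (q : List (Int × Int × Int)) (i j l : Int) :
    (regionA M q i j l).1 = regionB M i j l := by
  unfold regionA regionB
  exact foldl_fst_eq _ _
    (fun s oi => foldl_fst_eq _ _ (fun s oj => stA_fst i j oi oj s) _ s) _ (M, q)


lemma elif_val (M : List (List Int)) (i j oi oj : Int) (hoi : 0 ≤ oi) (hoj : 0 ≤ oj)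
    (hc1 : ¬(oi ≥ i ∧ oj ≥ j)) (hc2 : max (i - oi) (j - oj) < pvGetI M oi oj) :
    gN (regionStepB i j M oi oj) oi.toNat oj.toNat = max (i - oi) (j - oj) := by
  have hg := pvGetI_eq_gN M oi oj hoi hoj
  rw [hg] at hc2
  have hmax1 : 1 ≤ max (i - oi) (j - oj) := by omega
  have hin : oi.toNat < M.length ∧ oj.toNat < (M.getD oi.toNat []).length := by
    by_contra hc
    rw [not_and_or] at hc
    have := gN_oob M oi.toNat oj.toNat (by omega)
    omega
  rw [stB_char M i j oi oj hoi hoj, if_neg hc1, if_pos hc2, gN_setN,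
    if_pos ⟨rfl, rfl, hin.1, hin.2⟩]

lemma quad_val (M : List (List Int)) (i j oi oj : Int) (hoi : 0 ≤ oi) (hoj : 0 ≤ oj)
    (hc1 : oi ≥ i ∧ oj ≥ j) :
    gN (regionStepB i j M oi oj) oi.toNat oj.toNat = 0 := by
  rw [stB_char M i j oi oj hoi hoj, if_pos hc1, gN_setN]
  split_ifs with hc
  · rfl
  · apply gN_oob
    by_cases hx : oi.toNat < M.length
    · right
      by_cases hy : oj.toNat < (M.getD oi.toNat []).length
      · exact absurd ⟨rfl, rfl, hx, hy⟩ hc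
      · omega
    · left; omega

lemma stA_inv (i j oi oj : Int) (hi : 0 ≤ i) (hj : 0 ≤ j) (hoi : 0 ≤ oi) (hoj : 0 ≤ oj)
    (s : List (List Int) × List (Int × Int × Int)) (h : InvH i j s) :
    InvH i j (regionStepA i j s oi oj) ∧
      (regionStepA i j s oi oj).2.length + sumNat (regionStepA i j s oi oj).1
        ≤ s.2.length + sumNat s.1 := by
  obtain ⟨h1, h2, h3⟩ := h
  have hM' := stA_fst i j oi oj s
  have hq' := stA_snd i j oi oj s
  have hNN' : NN (regionStepA i j s oi oj).1 := by
    rw [hM']; exact stB_NN s.1 i j oi oj hoi hoj h1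
  have hmono : ∀ x y : Nat, gN (regionStepA i j s oi oj).1 x y ≤ gN s.1 x y := by
    rw [hM']; exact stB_mono s.1 i j oi oj hoi hoj h1
  have hsum_le : sumNat (regionStepA i j s oi oj).1 ≤ sumNat s.1 := by
    apply sumNat_le_of_pointwise
    intro x y
    have := hmono x y
    have := hNN' x y
    omega
  constructor
  · refine ⟨hNN', ?_, ?_⟩
    · intro t htq
      rw [hq'] at htq
      have hold : ∀ t ∈ s.2, 0 ≤ t.2.1 ∧ 0 ≤ t.2.2 ∧ 1 ≤ -t.1 ∧
          pvGetI (regionStepA i j s oi oj).1 t.2.1 t.2.2 ≤ -t.1 := by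
        intro t ht
        obtain ⟨ha, hb, hc, hd⟩ := h2 t ht
        refine ⟨ha, hb, hc, ?_⟩
        rw [pvGetI_eq_gN _ _ _ ha hb]
        rw [pvGetI_eq_gN _ _ _ ha hb] at hd
        exact le_trans (hmono _ _) hd
      split_ifs at htq with hc1 hc2
      · exact hold t htq
      · rcases List.mem_append.mp htq with hmem | hmem
        · exact hold t hmem
        · simp only [List.mem_singleton] at hmem
          subst hmem
          refine ⟨hoi, hoj, by simp; omega, ?_⟩
          simp only
          rw [pvGetI_eq_gN _ _ _ hoi hoj, hM', elif_val s.1 i j oi oj hoi hoj hc1 hc2]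
          simp
      · exact hold t htq
    · intro x y hx hy hne hlive
      by_cases hxy : x.toNat = oi.toNat ∧ y.toNat = oj.toNat
      · have hxo : x = oi := by omega
        have hyo : y = oj := by omega
        subst hxo; subst hyo
        rw [hq']
        split_ifs with hc1 hc2
        · exfalso
          rw [pvGetI_eq_gN _ _ _ hx hy, hM', quad_val s.1 i j x y hx hy hc1] at hlive
          omega
        · have : pvGetI (regionStepA i j s x y).1 x y = max (i - x) (j - y) := by
            rw [pvGetI_eq_gN _ _ _ hx hy, hM', elif_val s.1 i j x y hx hy hc1 hc2]
          rw [this]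
          simp
        · have hsame : pvGetI (regionStepA i j s x y).1 x y = pvGetI s.1 x y := by
            rw [pvGetI_eq_gN _ _ _ hx hy, hM', stB_char s.1 i j x y hx hy,
              if_neg hc1, if_neg (by rwa [pvGetI_eq_gN _ _ _ hx hy] at hc2),
              pvGetI_eq_gN _ _ _ hx hy]
          rw [hsame]
          rw [hsame] at hlive
          exact h3 x y hx hy hne hlive
      · have hsame : pvGetI (regionStepA i j s oi oj).1 x y = pvGetI s.1 x y := by
          rw [pvGetI_eq_gN _ _ _ hx hy, hM', stB_get_ne s.1 i j oi oj hoi hoj _ _ hxy,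
            pvGetI_eq_gN _ _ _ hx hy]
        rw [hsame]
        rw [hsame] at hlive
        have := h3 x y hx hy hne hlive
        rw [hq']
        split_ifs <;> simp [this]
  · rw [hq']
    split_ifs with hc1 hc2
    · omega
    · have hg := pvGetI_eq_gN s.1 oi oj hoi hoj
      have hc2' := hc2
      rw [hg] at hc2'
      have hmax1 : 1 ≤ max (i - oi) (j - oj) := by omega
      have hin : oi.toNat < s.1.length ∧ oj.toNat < (s.1.getD oi.toNat []).length := by
        by_contra hc
        rw [not_and_or] at hc
        have := gN_oob s.1 oi.toNat oj.toNat (by omega)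
        omega
      have hset := sumNat_setN s.1 oi.toNat oj.toNat (max (i - oi) (j - oj)) hin.1 hin.2
      have hform : (regionStepA i j s oi oj).1
          = setN s.1 oi.toNat oj.toNat (max (i - oi) (j - oj)) := by
        rw [hM', stB_char s.1 i j oi oj hoi hoj, if_neg hc1, if_pos hc2']
      rw [hform]
      simp only [List.length_append, List.length_singleton]
      have hgn : (gN s.1 oi.toNat oj.toNat).toNat ≥ (max (i - oi) (j - oj)).toNat + 1 := by
        omega
      omega
    · omega


lemma regionA_inv (M : List (List Int)) (q : List (Int × Int × Int)) (i j l : Int)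
    (hi : 0 ≤ i) (hj : 0 ≤ j) (h : InvH i j (M, q)) :
    InvH i j (regionA M q i j l) ∧
      (regionA M q i j l).2.length + sumNat (regionA M q i j l).1
        ≤ q.length + sumNat M := by
  unfold regionA
  have main := foldl_inv
    (fun s oi => (PySem.List.pyRange (max 0 (j - l)) (j + l) 1).foldl
      (fun s oj => regionStepA i j s oi oj) s)
    (fun s => InvH i j s ∧ s.2.length + sumNat s.1 ≤ q.length + sumNat M)
    (PySem.List.pyRange (max 0 (i - l)) (i + l) 1) (M, q)
    ?_ ⟨h, le_refl _⟩
  · exact ⟨main.1, main.2⟩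
  · intro s oi hmem hP
    have hoi : 0 ≤ oi := by
      have := (PySem.List.mem_pyRange_one).mp hmem
      omega
    exact foldl_inv (fun s oj => regionStepA i j s oi oj)
      (fun s => InvH i j s ∧ s.2.length + sumNat s.1 ≤ q.length + sumNat M)
      (PySem.List.pyRange (max 0 (j - l)) (j + l) 1) s
      (fun s' oj hmem' hP' => by
        have hoj : 0 ≤ oj := by
          have := (PySem.List.mem_pyRange_one).mp hmem'
          omega
        have := stA_inv i j oi oj hi hj hoi hoj s' hP'.1
        exact ⟨this.1, le_trans this.2 hP'.2⟩) hP


lemma loopA_eq_absL :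
    ∀ (fuel : Nat) (q : List (Int × Int × Int)) (M : List (List Int))
      (r : PySem.Dict Int Int) (f : Nat), NN M →
      (∀ t ∈ q, 0 ≤ t.2.1 ∧ 0 ≤ t.2.2 ∧ 1 ≤ -t.1 ∧ pvGetI M t.2.1 t.2.2 ≤ -t.1) →
      (∀ x y : Int, 0 ≤ x → 0 ≤ y → 1 ≤ pvGetI M x y → (-(pvGetI M x y), x, y) ∈ q) →
      q.length + sumNat M < fuel → sumNat M < f →
      loopA fuel q M r = absL f M r := by
  intro fuel
  induction fuel with
  | zero => intro q M r f _ _ _ hcnt _; omega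
  | succ fuel ih =>
    intro q M r f hNN hq hcov hcnt hf
    cases f with
    | zero => omega
    | succ f =>
      cases q with
      | nil =>
        have hpick : pick M = none := by
          rw [pick_none_iff]
          intro x y
          by_contra hc
          have h1 : 1 ≤ gN M x y := by omega
          have : 1 ≤ pvGetI M (x : Int) (y : Int) := by
            rw [pvGetI_eq_gN M _ _ (by positivity) (by positivity)]
            simpa using h1
          have := hcov (x : Int) (y : Int) (by positivity) (by positivity) this
          simp at this
        simp only [loopA, absL, hpick]
      | cons x qs =>
        have htmem := heapMin_mem x qs
        have htmin := heapMin_min x qs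
        obtain ⟨ht1, ht2, ht3, ht4⟩ := hq (heapMin x qs) htmem
        have hlen : ((x :: qs).erase (heapMin x qs)).length + 1 = (x :: qs).length := by
          rw [List.length_erase_of_mem htmem]
          simp
        simp only [loopA]
        split_ifs with hst
        · -- stale entry: skipped
          apply ih _ _ _ _ hNN
          · exact fun u hu => hq u (List.mem_of_mem_erase hu)
          · intro x0 y0 hx0 hy0 hlive
            have he := hcov x0 y0 hx0 hy0 hlive
            have hne : (-(pvGetI M x0 y0), x0, y0) ≠ heapMin x qs := by
              intro hc
              apply hst
              have h1 : pvGetI M x0 y0 = -(heapMin x qs).1 := by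
                rw [← hc]; simp
              have h2 : (heapMin x qs).2.1 = x0 := by rw [← hc]
              have h3 : (heapMin x qs).2.2 = y0 := by rw [← hc]
              rw [h2, h3, ← h1]
            exact (List.mem_erase_of_ne hne).mpr he
          · omega
          · exact hf
        · -- live entry: process it
          rw [not_not] at hst
          have hl1 : 1 ≤ pvGetI M (heapMin x qs).2.1 (heapMin x qs).2.2 := by omega
          have hgN : gN M (heapMin x qs).2.1.toNat (heapMin x qs).2.2.toNat
              = -(heapMin x qs).1 := by
            rw [← pvGetI_eq_gN M _ _ ht1 ht2, ← hst]
          have htc : cellTrip M (heapMin x qs).2.1.toNat (heapMin x qs).2.2.toNat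
              = heapMin x qs := by
            have hrhs : heapMin x qs
                = ((heapMin x qs).1, (heapMin x qs).2.1, (heapMin x qs).2.2) := rfl
            conv_rhs => rw [hrhs]
            simp only [cellTrip, Prod.mk.injEq]
            refine ⟨by omega, by omega, by omega⟩
          have hpick : pick M = some (heapMin x qs) := by
            apply pick_eq
            · rw [← htc]
              apply live_mem
              omega
            · intro u hu
              obtain ⟨x0, y0, hx0, hy0, h1, rfl⟩ := (mem_liveList M u).mp hu
              have hpv : pvGetI M (x0 : Int) (y0 : Int) = gN M x0 y0 := by
                rw [pvGetI_eq_gN M _ _ (by positivity) (by positivity)]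
                simp
              have he := hcov (x0 : Int) (y0 : Int) (by positivity) (by positivity)
                (by omega)
              rw [hpv] at he
              exact htmin _ he
          have hInvH : InvH (heapMin x qs).2.1 (heapMin x qs).2.2
              (M, (x :: qs).erase (heapMin x qs)) := by
            refine ⟨hNN, fun u hu => hq u (List.mem_of_mem_erase hu), ?_⟩
            intro x0 y0 hx0 hy0 hne hlive
            have he := hcov x0 y0 hx0 hy0 hlive
            have hne' : (-(pvGetI M x0 y0), x0, y0) ≠ heapMin x qs := by
              intro hc
              apply hne
              constructor
              · rw [← hc]
              · rw [← hc]
            exact (List.mem_erase_of_ne hne').mpr he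
          obtain ⟨hInv', hmu⟩ := regionA_inv M ((x :: qs).erase (heapMin x qs))
            (heapMin x qs).2.1 (heapMin x qs).2.2 (-(heapMin x qs).1) ht1 ht2 hInvH
          have hfst := regionA_fst M ((x :: qs).erase (heapMin x qs))
            (heapMin x qs).2.1 (heapMin x qs).2.2 (-(heapMin x qs).1)
          have hin1 : (heapMin x qs).2.1.toNat < M.length := by
            by_contra hc
            have := gN_oob M (heapMin x qs).2.1.toNat (heapMin x qs).2.2.toNat
              (Or.inl (by omega))
            omega
          have hin2 : (heapMin x qs).2.2.toNat
              < (M.getD (heapMin x qs).2.1.toNat []).length := by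
            by_contra hc
            have := gN_oob M (heapMin x qs).2.1.toNat (heapMin x qs).2.2.toNat
              (Or.inr (by omega))
            omega
          have hzero := regionB_zero M (heapMin x qs).2.1 (heapMin x qs).2.2
            (-(heapMin x qs).1) ht1 ht2 ht3
          have hsumlt := sumNat_regionB_lt M (heapMin x qs).2.1 (heapMin x qs).2.2
            (-(heapMin x qs).1) ht1 ht2 ht3 hNN hgN hin1 hin2
          have hcov' : ∀ x0 y0 : Int, 0 ≤ x0 → 0 ≤ y0 →
              1 ≤ pvGetI (regionA M ((x :: qs).erase (heapMin x qs))
                (heapMin x qs).2.1 (heapMin x qs).2.2 (-(heapMin x qs).1)).1 x0 y0 →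
              (-(pvGetI (regionA M ((x :: qs).erase (heapMin x qs))
                (heapMin x qs).2.1 (heapMin x qs).2.2 (-(heapMin x qs).1)).1 x0 y0), x0, y0)
                ∈ (regionA M ((x :: qs).erase (heapMin x qs))
                (heapMin x qs).2.1 (heapMin x qs).2.2 (-(heapMin x qs).1)).2 := by
            intro x0 y0 hx0 hy0 hlive
            by_cases hxy : x0 = (heapMin x qs).2.1 ∧ y0 = (heapMin x qs).2.2
            · exfalso
              rw [hxy.1, hxy.2] at hlive
              rw [pvGetI_eq_gN _ _ _ ht1 ht2, hfst, hzero] at hlive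
              omega
            · exact hInv'.2.2 x0 y0 hx0 hy0 hxy hlive
          have hmod : r.modify (-(heapMin x qs).1) 0 (· + 1)
              = r.insert (-(heapMin x qs).1) (r.getD (-(heapMin x qs).1) 0 + 1) := rfl
          simp only [absL, hpick]
          rw [hmod, ← hfst]
          exact ih _ _ _ f hInv'.1 hInv'.2.1 hcov' (by omega) (by rw [hfst]; omega)


-- ---- B-side simulation ----
def ShapeI (M : List (List Int)) (m n : Int) : Prop :=
  M.length = m.toNat ∧ ∀ row ∈ M, row.length = n.toNat

lemma shapeI_rowlen (M : List (List Int)) (m n : Int) (h : ShapeI M m n) (x : Nat)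
    (hx : x < m.toNat) : (M.getD x []).length = n.toNat := by
  have hML : M.length = m.toNat := h.1
  have hx' : x < M.length := by omega
  rw [List.getD_eq_getElem?_getD, List.getElem?_eq_getElem hx']
  exact h.2 _ (List.getElem_mem hx')


lemma shapeI_of_sameShape (M' M : List (List Int)) (m n : Int) (hs : SameShape M' M)
    (h : ShapeI M m n) : ShapeI M' m n := by
  refine ⟨hs.1.trans h.1, ?_⟩
  intro row hrow
  obtain ⟨x, hx, rfl⟩ := List.getElem_of_mem hrow
  have h1 := hs.2 x
  have hML : M'.length = M.length := hs.1
  have hx2 : x < M.length := by omega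
  have hMm : M.length = m.toNat := h.1
  have hlen := shapeI_rowlen M m n h x (by omega)
  rw [List.getD_eq_getElem?_getD, List.getElem?_eq_getElem hx,
    List.getD_eq_getElem?_getD, List.getElem?_eq_getElem hx2] at h1
  simp only [Option.getD_some] at h1
  rw [List.getD_eq_getElem?_getD, List.getElem?_eq_getElem hx2] at hlen
  simp only [Option.getD_some] at hlen
  rw [h1, hlen]


lemma pick_at (M : List (List Int)) (l i j m n : Int) (hNN : NN M) (hsh : ShapeI M m n)
    (hle : ∀ x y : Nat, gN M x y ≤ l)
    (hpre : ∀ x y : Nat, ((x : Int) < i ∨ ((x : Int) = i ∧ (y : Int) < j)) → gN M x y < l)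
    (hl : 1 ≤ l) (hi : 0 ≤ i) (hj : 0 ≤ j) (hg : pvGetI M i j = l) :
    pick M = some (-l, i, j) := by
  have hgN : gN M i.toNat j.toNat = l := by
    rw [← pvGetI_eq_gN M i j hi hj]; exact hg
  have htc : cellTrip M i.toNat j.toNat = (-l, i, j) := by
    simp only [cellTrip, Prod.mk.injEq]
    refine ⟨by omega, by omega, by omega⟩
  apply pick_eq
  · rw [← htc]
    exact live_mem M i.toNat j.toNat (by omega)
  · intro u hu
    obtain ⟨x0, y0, hx0, hy0, h1, rfl⟩ := (mem_liveList M u).mp hu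
    have hv := hle x0 y0
    simp only [cellTrip, tripLt]
    simp only [Bool.or_eq_false_iff, Bool.and_eq_false_iff,
      decide_eq_false_iff_not, beq_eq_false_iff_ne, ne_eq]
    by_cases hvl : gN M x0 y0 = l
    · -- same level: (x0, y0) is not before (i, j)
      have hnb : ¬((x0 : Int) < i ∨ ((x0 : Int) = i ∧ (y0 : Int) < j)) := by
        intro hc
        have := hpre x0 y0 hc
        omega
      rw [not_or, not_and_or] at hnb
      rcases hnb.2 with hc | hc <;> omega
    · omega


lemma innerScan (m n l i : Int) (hl : 1 ≤ l) (hi : 0 ≤ i) :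
    ∀ (cnt : Nat) (j0 : Int) (M : List (List Int)) (r : PySem.Dict Int Int) (f : Nat),
      (n - j0).toNat = cnt → 0 ≤ j0 → NN M → ShapeI M m n →
      (∀ x y : Nat, gN M x y ≤ l) →
      (∀ x y : Nat, ((x : Int) < i ∨ ((x : Int) = i ∧ (y : Int) < j0)) → gN M x y < l) →
      sumNat M < f →
      ∀ s, s = (PySem.List.pyRange j0 n 1).foldl (fun s j => scanStep l s i j) (M, r) →
      NN s.1 ∧ ShapeI s.1 m n ∧ (∀ x y : Nat, gN s.1 x y ≤ l) ∧
        (∀ x y : Nat, ((x : Int) < i ∨ ((x : Int) = i ∧ (y : Int) < n)) → gN s.1 x y < l) ∧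
        sumNat s.1 ≤ sumNat M ∧ absL f M r = absL f s.1 s.2 := by
  intro cnt
  induction cnt with
  | zero =>
    intro j0 M r f hc hj0 hNN hsh hle hpre hf s hs
    have hnil : PySem.List.pyRange j0 n 1 = [] := PySem.List.pyRange_one_eq_nil (by omega)
    rw [hnil] at hs
    simp only [List.foldl_nil] at hs
    subst hs
    exact ⟨hNN, hsh, hle, fun x y hxy => hpre x y (by omega), le_refl _, rfl⟩
  | succ cnt ih =>
    intro j0 M r f hc hj0 hNN hsh hle hpre hf s hs
    have hcons : PySem.List.pyRange j0 n 1 = j0 :: PySem.List.pyRange (j0 + 1) n 1 :=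
      PySem.List.pyRange_one_cons (by omega)
    rw [hcons, List.foldl_cons] at hs
    by_cases hcell : pvGetI M i j0 = l
    · -- the cell is processed
      have hstep : scanStep l (M, r) i j0
          = (regionB M i j0 l, r.insert l (r.getD l 0 + 1)) := by
        simp only [scanStep, if_pos hcell]
      rw [hstep] at hs
      obtain ⟨hNN', hshape', hmono⟩ := regionB_bundle M i j0 l hi hj0 hNN
      have hzero := regionB_zero M i j0 l hi hj0 hl
      have hle' : ∀ x y : Nat, gN (regionB M i j0 l) x y ≤ l :=
        fun x y => le_trans (hmono x y) (hle x y)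
      have hpre' : ∀ x y : Nat,
          ((x : Int) < i ∨ ((x : Int) = i ∧ (y : Int) < j0 + 1)) →
          gN (regionB M i j0 l) x y < l := by
        intro x y hxy
        by_cases hat : (x : Int) = i ∧ (y : Int) = j0
        · have hx' : x = i.toNat := by omega
          have hy' : y = j0.toNat := by omega
          rw [hx', hy', hzero]
          omega
        · have : ((x : Int) < i ∨ ((x : Int) = i ∧ (y : Int) < j0)) := by
            rcases hxy with h | h
            · exact Or.inl h
            · right
              refine ⟨h.1, ?_⟩
              by_contra hcon
              exact hat ⟨h.1, by omega⟩
          exact lt_of_le_of_lt (hmono x y) (hpre x y this)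
      -- the pick at this moment is exactly this cell
      have hpick := pick_at M l i j0 m n hNN hsh hle hpre hl hi hj0 hcell
      have hsum' : sumNat (regionB M i j0 l) < sumNat M := by
        apply sumNat_regionB_lt M i j0 l hi hj0 hl hNN
        · rw [← pvGetI_eq_gN M i j0 hi hj0]; exact hcell
        · by_contra hcon
          have h0 := gN_oob M i.toNat j0.toNat (Or.inl (by omega))
          rw [← pvGetI_eq_gN M i j0 hi hj0] at h0
          omega
        · by_contra hcon
          have h0 := gN_oob M i.toNat j0.toNat (Or.inr (by omega))
          rw [← pvGetI_eq_gN M i j0 hi hj0] at h0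
          omega
      have habs : absL f M r = absL f (regionB M i j0 l) (r.insert l (r.getD l 0 + 1)) := by
        cases f with
        | zero => omega
        | succ f' =>
          simp only [absL, hpick]
          simp only [neg_neg]
          exact absL_congr f' (f' + 1) _ _ hNN' (by omega) (by omega)
      have hrec := ih (j0 + 1) (regionB M i j0 l) (r.insert l (r.getD l 0 + 1)) f
        (by omega) (by omega) hNN' (shapeI_of_sameShape _ _ m n hshape' hsh)
        hle' hpre' (by omega) s hs
      exact ⟨hrec.1, hrec.2.1, hrec.2.2.1, hrec.2.2.2.1,
        le_trans hrec.2.2.2.2.1 (le_of_lt hsum'),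
        habs.trans hrec.2.2.2.2.2⟩
    · -- the cell is skipped
      have hstep : scanStep l (M, r) i j0 = (M, r) := by
        simp only [scanStep, if_neg hcell]
      rw [hstep] at hs
      have hpre' : ∀ x y : Nat,
          ((x : Int) < i ∨ ((x : Int) = i ∧ (y : Int) < j0 + 1)) → gN M x y < l := by
        intro x y hxy
        by_cases hat : (x : Int) = i ∧ (y : Int) = j0
        · have hx' : x = i.toNat := by omega
          have hy' : y = j0.toNat := by omega
          have hgn : gN M x y = pvGetI M i j0 := by
            rw [hx', hy', ← pvGetI_eq_gN M i j0 hi hj0]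
          have := hle x y
          rw [hgn] at this ⊢
          omega
        · apply hpre x y
          rcases hxy with h | h
          · exact Or.inl h
          · right
            refine ⟨h.1, ?_⟩
            by_contra hcon
            exact hat ⟨h.1, by omega⟩
      exact ih (j0 + 1) M r f (by omega) (by omega) hNN hsh hle hpre' hf s hs


lemma midScan (m n l : Int) (hl : 1 ≤ l) :
    ∀ (cnt : Nat) (i0 : Int) (M : List (List Int)) (r : PySem.Dict Int Int) (f : Nat),
      (m - i0).toNat = cnt → 0 ≤ i0 → NN M → ShapeI M m n →
      (∀ x y : Nat, gN M x y ≤ l) →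
      (∀ x y : Nat, (x : Int) < i0 → gN M x y < l) →
      sumNat M < f →
      ∀ s, s = (PySem.List.pyRange i0 m 1).foldl
        (fun s i => (PySem.List.pyRange 0 n 1).foldl (fun s j => scanStep l s i j) s) (M, r) →
      NN s.1 ∧ ShapeI s.1 m n ∧ (∀ x y : Nat, gN s.1 x y < l) ∧
        sumNat s.1 ≤ sumNat M ∧ absL f M r = absL f s.1 s.2 := by
  intro cnt
  induction cnt with
  | zero =>
    intro i0 M r f hc hi0 hNN hsh hle hpre hf s hs
    have hnil : PySem.List.pyRange i0 m 1 = [] := PySem.List.pyRange_one_eq_nil (by omega)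
    rw [hnil] at hs
    simp only [List.foldl_nil] at hs
    subst hs
    refine ⟨hNN, hsh, ?_, le_refl _, rfl⟩
    intro x y
    by_cases hx : (x : Int) < i0
    · exact hpre x y hx
    · have hxm : M.length ≤ x := by
        have := hsh.1
        omega
      rw [gN_oob M x y (Or.inl hxm)]
      omega
  | succ cnt ih =>
    intro i0 M r f hc hi0 hNN hsh hle hpre hf s hs
    have hcons : PySem.List.pyRange i0 m 1 = i0 :: PySem.List.pyRange (i0 + 1) m 1 :=
      PySem.List.pyRange_one_cons (by omega)
    rw [hcons, List.foldl_cons] at hs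
    obtain ⟨hNN1, hsh1, hle1, hpre1, hsum1, habs1⟩ :=
      innerScan m n l i0 hl hi0 (n - 0).toNat 0 M r f rfl (le_refl 0) hNN hsh hle
        (fun x y hxy => by
          rcases hxy with h | h
          · exact hpre x y h
          · exact absurd h.2 (by omega))
        hf _ rfl
    have hpre1' : ∀ x y : Nat, (x : Int) < i0 + 1 →
        gN ((PySem.List.pyRange 0 n 1).foldl (fun s j => scanStep l s i0 j) (M, r)).1 x y
          < l := by
      intro x y hx
      by_cases hxi : (x : Int) = i0
      · by_cases hy : (y : Int) < n
        · exact hpre1 x y (Or.inr ⟨hxi, hy⟩)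
        · have hxm : x < m.toNat := by omega
          have hrow := shapeI_rowlen _ m n hsh1 x hxm
          rw [gN_oob _ x y (Or.inr (by omega))]
          omega
      · exact hpre1 x y (Or.inl (by omega))
    have hrec := ih (i0 + 1)
      ((PySem.List.pyRange 0 n 1).foldl (fun s j => scanStep l s i0 j) (M, r)).1
      ((PySem.List.pyRange 0 n 1).foldl (fun s j => scanStep l s i0 j) (M, r)).2 f
      (by omega) (by omega) hNN1 hsh1 hle1 hpre1' (by omega) s (by rw [hs])
    exact ⟨hrec.1, hrec.2.1, hrec.2.2.1, le_trans hrec.2.2.2.1 hsum1,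
      habs1.trans hrec.2.2.2.2⟩


lemma outerScan (m n : Int) :
    ∀ (cnt : Nat) (l0 : Int) (M : List (List Int)) (r : PySem.Dict Int Int) (f : Nat),
      l0.toNat = cnt → NN M → ShapeI M m n → (∀ x y : Nat, gN M x y ≤ l0) →
      sumNat M < f →
      absL f M r
        = ((PySem.List.pyRange l0 0 (-1)).foldl
            (fun s l =>
              (PySem.List.pyRange 0 m 1).foldl
                (fun s i =>
                  (PySem.List.pyRange 0 n 1).foldl (fun s j => scanStep l s i j) s) s)
            (M, r)).2 := by
  intro cnt
  induction cnt with
  | zero =>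
    intro l0 M r f hc hNN hsh hle hf
    have hnil : PySem.List.pyRange l0 0 (-1) = [] :=
      PySem.List.pyRange_neg_one_eq_nil (by omega)
    rw [hnil]
    simp only [List.foldl_nil]
    have hpick : pick M = none := by
      rw [pick_none_iff]
      intro x y
      have h1 := hle x y
      omega
    cases f with
    | zero => omega
    | succ f' => simp only [absL, hpick]
  | succ cnt ih =>
    intro l0 M r f hc hNN hsh hle hf
    have hl0 : 1 ≤ l0 := by omega
    have hcons : PySem.List.pyRange l0 0 (-1) = l0 :: PySem.List.pyRange (l0 - 1) 0 (-1) :=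
      PySem.List.pyRange_neg_one_cons (by omega)
    rw [hcons, List.foldl_cons]
    obtain ⟨hNN1, hsh1, hlt1, hsum1, habs1⟩ :=
      midScan m n l0 hl0 (m - 0).toNat 0 M r f rfl (le_refl 0) hNN hsh hle
        (fun x y hx => absurd hx (by omega)) hf _ rfl
    rw [habs1]
    exact ih (l0 - 1) _ _ f (by omega) hNN1 hsh1 (fun x y => by have := hlt1 x y; omega)
      (by omega)


-- ---- DP phase facts ----
lemma pvGetI_neg (C : List (List Int)) (m n a b : Int) (hsh : ShapeI C m n)
    (hn : 0 ≤ n) (ha1 : -m ≤ a) (ha2 : a ≤ -1) (hb1 : -n ≤ b) (hb2 : b ≤ -1) :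
    pvGetI C a b = gN C (m.toNat - (-a).toNat) (n.toNat - (-b).toNat) := by
  have hml : C.length = m.toNat := hsh.1
  have hrow : PySem.List.pyGetD C a [] = C.getD (m.toNat - (-a).toNat) [] := by
    rw [pyGetD_negIdx C a [] (by omega) (by omega), hml]
  have hwa : m.toNat - (-a).toNat < m.toNat := by omega
  have hrl := shapeI_rowlen C m n hsh _ hwa
  unfold pvGetI
  rw [hrow, pyGetD_negIdx _ b 0 (by omega) (by omega), hrl, gN]

lemma pvSetI_neg (C : List (List Int)) (m n a b : Int) (v : Int) (hsh : ShapeI C m n)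
    (hn : 0 ≤ n) (ha1 : -m ≤ a) (ha2 : a ≤ -1) (hb1 : -n ≤ b) (hb2 : b ≤ -1) :
    pvSetI C a b v = setN C (m.toNat - (-a).toNat) (n.toNat - (-b).toNat) v := by
  have hml : C.length = m.toNat := hsh.1
  have hrow : PySem.List.pyGetD C a [] = C.getD (m.toNat - (-a).toNat) [] := by
    rw [pyGetD_negIdx C a [] (by omega) (by omega), hml]
  have hwa : m.toNat - (-a).toNat < m.toNat := by omega
  have hrl := shapeI_rowlen C m n hsh _ hwa
  unfold pvSetI
  rw [hrow, pySetD_negIdx _ b v (by omega) (by omega), hrl,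
    pySetD_negIdx C a _ (by omega) (by omega), hml, setN]

lemma dpP_step (grid C : List (List Int)) (m n i j : Int)
    (hn : 0 ≤ n) (hi1 : -m ≤ i) (hi2 : i ≤ -2) (hj1 : -n ≤ j) (hj2 : j ≤ -2)
    (hsh : ShapeI C m n)
    (hge : ∀ x y : Nat, x < m.toNat → y < n.toNat → 1 ≤ gN C x y) :
    ShapeI (dpStep grid C i j) m n ∧
      (∀ x y : Nat, x < m.toNat → y < n.toNat → 1 ≤ gN (dpStep grid C i j) x y) := by
  have hml : C.length = m.toNat := hsh.1
  unfold dpStep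
  split_ifs with hcond
  · simp only []
    set wa := m.toNat - (-i).toNat with hwa_def
    set wb := n.toNat - (-j).toNat with hwb_def
    have hwa : wa < m.toNat := by omega
    have hwb : wb < n.toNat := by omega
    have hv1 : 1 ≤ pvGetI C (i + 1) j := by
      rw [pvGetI_neg C m n (i + 1) j hsh hn (by omega) (by omega) (by omega) (by omega)]
      exact hge _ _ (by omega) (by omega)
    have hv2 : 1 ≤ pvGetI C i (j + 1) := by
      rw [pvGetI_neg C m n i (j + 1) hsh hn (by omega) (by omega) (by omega) (by omega)]
      exact hge _ _ (by omega) (by omega)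
    have hv : 1 ≤ min (pvGetI C (i + 1) j) (pvGetI C i (j + 1)) := le_min hv1 hv2
    have hset1 : pvSetI C i j (min (pvGetI C (i + 1) j) (pvGetI C i (j + 1)))
        = setN C wa wb (min (pvGetI C (i + 1) j) (pvGetI C i (j + 1))) :=
      pvSetI_neg C m n i j _ hsh hn (by omega) (by omega) (by omega) (by omega)
    have hsh1 : ShapeI (setN C wa wb (min (pvGetI C (i + 1) j) (pvGetI C i (j + 1)))) m n :=
      shapeI_of_sameShape _ C m n (sameShape_setN C wa wb _) hsh
    have hge1 : ∀ x y : Nat, x < m.toNat → y < n.toNat →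
        1 ≤ gN (setN C wa wb (min (pvGetI C (i + 1) j) (pvGetI C i (j + 1)))) x y := by
      intro x y hx hy
      rw [gN_setN]
      split_ifs with hc
      · exact hv
      · exact hge x y hx hy
    have hread : pvGetI (setN C wa wb (min (pvGetI C (i + 1) j) (pvGetI C i (j + 1)))) i j
        = min (pvGetI C (i + 1) j) (pvGetI C i (j + 1)) := by
      rw [pvGetI_neg _ m n i j hsh1 hn (by omega) (by omega) (by omega) (by omega),
        gN_setN, if_pos ⟨rfl, rfl, by omega,
          by rw [shapeI_rowlen C m n hsh wa hwa]; omega⟩]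
    rw [hset1, hread]
    split_ifs with hcond2
    · have hset2 : pvSetI (setN C wa wb (min (pvGetI C (i + 1) j) (pvGetI C i (j + 1)))) i j
          (min (pvGetI C (i + 1) j) (pvGetI C i (j + 1)) + 1)
          = setN (setN C wa wb (min (pvGetI C (i + 1) j) (pvGetI C i (j + 1)))) wa wb
            (min (pvGetI C (i + 1) j) (pvGetI C i (j + 1)) + 1) :=
        pvSetI_neg _ m n i j _ hsh1 hn (by omega) (by omega) (by omega) (by omega)
      rw [hset2]
      refine ⟨shapeI_of_sameShape _ _ m n (sameShape_setN _ wa wb _) hsh1, ?_⟩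
      intro x y hx hy
      rw [gN_setN]
      split_ifs with hc
      · omega
      · exact hge1 x y hx hy
    · exact ⟨hsh1, hge1⟩
  · exact ⟨hsh, hge⟩

lemma dpPhase_facts (grid : List (List Int)) (m n : Int) (hm : 0 ≤ m) (hn : 0 ≤ n) :
    ShapeI (dpPhase grid m n) m n ∧
      (∀ x y : Nat, x < m.toNat → y < n.toNat → 1 ≤ gN (dpPhase grid m n) x y) := by
  unfold dpPhase
  have hinit : ShapeI ((PySem.List.pyRange 0 m 1).map
        (fun _ => PySem.List.pyRepeat [(1 : Int)] n)) m n ∧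
      (∀ x y : Nat, x < m.toNat → y < n.toNat →
        1 ≤ gN ((PySem.List.pyRange 0 m 1).map
          (fun _ => PySem.List.pyRepeat [(1 : Int)] n)) x y) := by
    have hrep : PySem.List.pyRepeat [(1 : Int)] n = List.replicate n.toNat 1 :=
      PySem.List.pyRepeat_singleton 1 n
    have hlen : ((PySem.List.pyRange 0 m 1).map
        (fun _ => PySem.List.pyRepeat [(1 : Int)] n)).length = m.toNat := by
      rw [List.length_map, PySem.List.length_pyRange_one]
      omega
    constructor
    · refine ⟨hlen, ?_⟩
      intro row hrow
      obtain ⟨z, _, rfl⟩ := List.mem_map.mp hrow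
      rw [hrep, List.length_replicate]
    · intro x y hx hy
      have hx' : x < ((PySem.List.pyRange 0 m 1).map
          (fun _ => PySem.List.pyRepeat [(1 : Int)] n)).length := by omega
      have hrowx : ((PySem.List.pyRange 0 m 1).map
          (fun _ => PySem.List.pyRepeat [(1 : Int)] n)).getD x [] = List.replicate n.toNat 1 := by
        rw [List.getD_eq_getElem?_getD, List.getElem?_eq_getElem hx']
        simp [hrep]
      rw [gN, hrowx]
      rw [List.getD_eq_getElem?_getD,
        List.getElem?_eq_getElem (by rw [List.length_replicate]; omega)]
      simp
  have main := foldl_inv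
    (fun C i => (PySem.List.pyRange (-2) (-n - 1) (-1)).foldl (fun C j => dpStep grid C i j) C)
    (fun C => ShapeI C m n ∧
      ∀ x y : Nat, x < m.toNat → y < n.toNat → 1 ≤ gN C x y)
    (PySem.List.pyRange (-2) (-m - 1) (-1)) _ ?_ hinit
  · exact main
  · intro C i hmem hP
    have hi := (PySem.List.mem_pyRange_neg_one).mp hmem
    exact foldl_inv (fun C j => dpStep grid C i j)
      (fun C => ShapeI C m n ∧
        ∀ x y : Nat, x < m.toNat → y < n.toNat → 1 ≤ gN C x y)
      (PySem.List.pyRange (-2) (-n - 1) (-1)) C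
      (fun C' j hmem' hP' => by
        have hj := (PySem.List.mem_pyRange_neg_one).mp hmem'
        exact dpP_step grid C' m n i j hn (by omega) (by omega) (by omega) (by omega)
          hP'.1 hP'.2) hP


lemma NN_of_dp (C : List (List Int)) (m n : Int) (hsh : ShapeI C m n)
    (hge : ∀ x y : Nat, x < m.toNat → y < n.toNat → 1 ≤ gN C x y) : NN C := by
  intro x y
  have hm := hsh.1
  by_cases hx : x < m.toNat
  · by_cases hy : y < n.toNat
    · have := hge x y hx hy
      omega
    · have := shapeI_rowlen C m n hsh x hx
      rw [gN_oob C x y (Or.inr (by omega))]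
  · rw [gN_oob C x y (Or.inl (by omega))]


lemma foldmax_facts :
    ∀ (M : List (List Int)) (a : Int),
      a ≤ M.foldl (fun a row => row.foldl (fun a v => max a v) a) a ∧
      (∀ x y : Nat, x < M.length → y < (M.getD x []).length →
        gN M x y ≤ M.foldl (fun a row => row.foldl (fun a v => max a v) a) a) := by
  intro M
  induction M with
  | nil => exact fun a => ⟨le_refl a, fun x y hx _ => by simp at hx⟩
  | cons row t ih =>
    intro a
    have hrow := PySem.List.le_foldl_max row a
    have hup := ih (row.foldl (fun a v => max a v) a)
    constructor
    · exact le_trans hrow.1 hup.1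
    · intro x y hx hy
      cases x with
      | zero =>
        have hy' : y < row.length := by simpa using hy
        have hmem : gN (row :: t) 0 y ∈ row := by
          have : gN (row :: t) 0 y = row[y] := by
            simp [gN, List.getD_eq_getElem?_getD, List.getElem?_eq_getElem hy']
          rw [this]
          exact List.getElem_mem hy'
        exact le_trans (hrow.2 _ hmem) hup.1
      | succ x' =>
        have := hup.2 x' y (by simpa using hx) (by simpa using hy)
        simpa [gN] using this


lemma q0_mem (C : List (List Int)) (m n : Int) (t : Int × Int × Int) :
    t ∈ ((PySem.List.pyRange 0 m 1).foldl
          (fun q i =>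
            (PySem.List.pyRange 0 n 1).foldl (fun q j => q ++ [(-(pvGetI C i j), i, j)]) q)
          ([] : List (Int × Int × Int)))
      ↔ ∃ i j : Int, 0 ≤ i ∧ i < m ∧ 0 ≤ j ∧ j < n ∧ t = (-(pvGetI C i j), i, j) := by
  simp only [PySem.List.foldl_append_singleton_eq_map]
  rw [PySem.List.foldl_append_eq_flatMap]
  simp only [List.nil_append, List.mem_flatMap, List.mem_map, PySem.List.mem_pyRange_one]
  constructor
  · rintro ⟨i, ⟨hi0, him⟩, j, ⟨⟨hj0, hjn⟩, rfl⟩⟩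
    exact ⟨i, j, hi0, him, hj0, hjn, rfl⟩
  · rintro ⟨i, j, hi0, him, hj0, hjn, rfl⟩
    exact ⟨i, ⟨hi0, him⟩, j, ⟨⟨hj0, hjn⟩, rfl⟩⟩


-- ===== VERDICT (by name: the statement is the Claim_ definition above) =====
theorem solve_eq_alt (grid : List (List Int)) : solve grid = solve_alt grid := by
  unfold solve solve_alt
  simp only []
  set m : Int := PySem.List.len grid with hm_def
  set n : Int := PySem.List.len (PySem.List.pyGetD grid 0 []) with hn_def
  have hm0 : 0 ≤ m := by rw [hm_def, PySem.List.len_eq]; positivity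
  have hn0 : 0 ≤ n := by rw [hn_def, PySem.List.len_eq]; positivity
  obtain ⟨hsh, hge⟩ := dpPhase_facts grid m n hm0 hn0
  set C := dpPhase grid m n with hC_def
  have hNN : NN C := NN_of_dp C m n hsh hge
  set q0 := (PySem.List.pyRange 0 m 1).foldl
    (fun q i =>
      (PySem.List.pyRange 0 n 1).foldl (fun q j => q ++ [(-(pvGetI C i j), i, j)]) q)
    ([] : List (Int × Int × Int)) with hq0_def
  have hml : C.length = m.toNat := hsh.1
  -- the A side equals the abstract greedy
  have hA : loopA (q0.length + sumNat C + 1) q0 C PySem.Dict.empty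
      = absL (sumNat C + 1) C PySem.Dict.empty := by
    apply loopA_eq_absL _ _ _ _ _ hNN
    · intro t ht
      obtain ⟨i, j, hi0, him, hj0, hjn, rfl⟩ := (q0_mem C m n t).mp (hq0_def ▸ ht)
      have hgn : pvGetI C i j = gN C i.toNat j.toNat := pvGetI_eq_gN C i j hi0 hj0
      have h1 : 1 ≤ pvGetI C i j := by
        rw [hgn]
        exact hge i.toNat j.toNat (by omega) (by omega)
      exact ⟨hi0, hj0, by simp only; omega, by simp only; omega⟩
    · intro x y hx hy hlive
      have hgn : pvGetI C x y = gN C x.toNat y.toNat := pvGetI_eq_gN C x y hx hy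
      have hinx : x.toNat < C.length := by
        by_contra hc
        have := gN_oob C x.toNat y.toNat (Or.inl (by omega))
        omega
      have hiny : y.toNat < (C.getD x.toNat []).length := by
        by_contra hc
        have := gN_oob C x.toNat y.toNat (Or.inr (by omega))
        omega
      have hrl := shapeI_rowlen C m n hsh x.toNat (by omega)
      rw [hq0_def]
      exact (q0_mem C m n _).mpr ⟨x, y, hx, by omega, hy, by rw [hrl] at hiny; omega, rfl⟩
    · omega
    · omega
  -- the B side equals the abstract greedy
  have hbound : ∀ x y : Nat,
      gN C x y ≤ C.foldl (fun a (row : List Int) => row.foldl (fun a v => max a v) a) 0 := by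
    intro x y
    by_cases hx : x < C.length
    · by_cases hy : y < (C.getD x []).length
      · exact (foldmax_facts C 0).2 x y hx hy
      · rw [gN_oob C x y (Or.inr (by omega))]
        exact (foldmax_facts C 0).1
    · rw [gN_oob C x y (Or.inl (by omega))]
      exact (foldmax_facts C 0).1
  have hB := outerScan m n
    (C.foldl (fun a (row : List Int) => row.foldl (fun a v => max a v) a) 0).toNat
    (C.foldl (fun a (row : List Int) => row.foldl (fun a v => max a v) a) 0) C
    PySem.Dict.empty (sumNat C + 1) rfl hNN hsh hbound (by omega)
  rw [hA, hB]

theorem solve_spec : Claim_equal_solve := by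
  intro grid _ _
  unfold Spec_solve
  exact solve_eq_alt grid
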